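-- pv_equiv track=rewrite | github.com/HaonanGu/tre_structure_insurance | TreeBuilder.py | _make_sections
-- ===== SOURCE A (Python) =====
-- def _make_sections(depths):
--     max_depth = max(depths)
--     running_sections = [[] for _ in range(max_depth + 1)]
--     sections = []
--     for idx, depth in enumerate(depths):
--         for child_section_depth in range(depth + 1, max_depth + 1):
--             if len(running_sections[child_section_depth]) == 0:
--                 continue
--             sections.append(running_sections[child_section_depth])
--             running_sections[child_section_depth] = []
--         running_sections[depth].append(idx)
--     for depth in range(max_depth + 1):
--         if len(running_sections[depth]) > 0:
--             sections.append(running_sections[depth])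
--     idx_to_section = [None for _ in range(len(depths))]
--     for section in sections:
--         for idx in section:
--             idx_to_section[idx] = section
--     return sections, idx_to_section
-- ===== SOURCE B (Python) =====
-- def _make_sections(depths):
--     # One pass with a stack of (depth, bucket) pairs, depths strictly increasing
--     # bottom-to-top; flushing pops the top instead of scanning all depths.
--     sections = []
--     stack = []
--     for idx, depth in enumerate(depths):
--         popped = []
--         while stack and stack[-1][0] > depth:
--             popped.append(stack.pop()[1])
--         sections.extend(reversed(popped))
--         if stack and stack[-1][0] == depth:
--             stack[-1][1].append(idx)
--         else:
--             stack.append((depth, [idx]))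
--     sections.extend(bucket for _, bucket in stack)
--     idx_to_section = [None] * len(depths)
--     for section in sections:
--         for idx in section:
--             idx_to_section[idx] = section
--     return sections, idx_to_section
-- ===== Notes on version B (the rewrite author's own statement) =====
-- stated objective: alternative
-- what changed: Replaces the bucket array of size max(depths)+1 with a per-element flush scan over every deeper level by a single pass over a stack of active (depth, bucket) pairs kept strictly increasing in depth, so each bucket is pushed and popped once (O(n) vs O(n*max_depth); a timing run could not verify this because its large random inputs contain negative depths, outside Pre_).
-- outside the precondition, e.g. on _make_sections([-1, 0]): A returns ([[0, 1]], [[0, 1], [0, 1]]), B returns ([[0], [1]], [[0], [1]]); on _make_sections([]): A raises ValueError, B returns ([], [])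
import Mathlib
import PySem

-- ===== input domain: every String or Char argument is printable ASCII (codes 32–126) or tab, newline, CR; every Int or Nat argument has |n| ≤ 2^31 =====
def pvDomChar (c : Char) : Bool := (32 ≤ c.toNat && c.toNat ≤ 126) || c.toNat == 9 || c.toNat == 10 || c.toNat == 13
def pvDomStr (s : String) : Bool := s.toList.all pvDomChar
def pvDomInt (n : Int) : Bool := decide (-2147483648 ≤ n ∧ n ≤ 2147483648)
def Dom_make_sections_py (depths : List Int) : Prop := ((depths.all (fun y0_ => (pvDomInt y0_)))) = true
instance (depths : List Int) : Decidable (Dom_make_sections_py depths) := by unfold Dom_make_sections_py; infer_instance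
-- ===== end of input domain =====

-- B replaces A's size-(max+1) bucket array and per-element scan over all deeper levels by a
-- single pass with a stack of active (depth, bucket) pairs; equivalence is proved on nonempty
-- lists of nonnegative depths (the function's natural domain).

-- ===== PORT A =====
-- inner loop body: flush running_sections[c] if nonempty (pyGetD/pySetD are exact here:
-- under Pre_ every index used is in range, where Python raises IndexError is outside Pre_)
def pvFlushA (st : List (List Int) × List (List Int)) (c : Int) : List (List Int) × List (List Int) :=
  if (PySem.List.pyGetD st.1 c []).length = 0 then st
  else (PySem.List.pySetD st.1 c [], st.2 ++ [PySem.List.pyGetD st.1 c []])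

-- body of 'for idx, depth in enumerate(depths)'
def pvStepA (M : Int) (st : List (List Int) × List (List Int)) (p : Int × Int) :
    List (List Int) × List (List Int) :=
  let st1 := (PySem.List.pyRange (p.2 + 1) (M + 1) 1).foldl pvFlushA st
  (PySem.List.pySetD st1.1 p.2 (PySem.List.pyGetD st1.1 p.2 [] ++ [p.1]), st1.2)

-- idx_to_section fill loop; the None placeholders live in Option
def pvFillA (n : Nat) (sections : List (List Int)) : List (Option (List Int)) :=
  sections.foldl (fun acc s => s.foldl (fun acc2 i => PySem.List.pySetD acc2 i (some s)) acc)
    (List.replicate n none)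

def make_sections_py (depths : List Int) : List (List Int) × List (List Int) :=
  match PySem.List.max? depths (fun x => x) with
  | none => ([], [])  -- Python: max([]) raises ValueError (excluded by Pre_)
  | some M =>
    let st := (PySem.List.enumerate depths 0).foldl (pvStepA M)
                (List.replicate (M + 1).toNat ([] : List Int), ([] : List (List Int)))
    let sections := (PySem.List.pyRange 0 (M + 1) 1).foldl
        (fun acc c => if 0 < (PySem.List.pyGetD st.1 c ([] : List Int)).length
                      then acc ++ [PySem.List.pyGetD st.1 c []] else acc) st.2
    -- on Pre_ no None placeholder survives (every index lies in exactly one section);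
    -- '.getD []' only realises the Lean return type
    (sections, (pvFillA depths.length sections).map (fun o => o.getD []))

-- ===== PORT B =====
-- the Python stack has its top at the END of the list; the Lean stack is kept top-at-HEAD,
-- so 'while stack and stack[-1][0] > depth: popped.append(stack.pop())' plus
-- 'sections.extend(reversed(popped))' is this recursion (it appends the popped buckets
-- to sections in bottom-to-top, i.e. increasing-depth, order)
def pvPopFlushB (d : Int) : List (Int × List Int) → List (List Int) →
    List (Int × List Int) × List (List Int)
  | [], secs => ([], secs)
  | (pd, b) :: rest, secs =>
      if d < pd then
        let r := pvPopFlushB d rest secs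
        (r.1, r.2 ++ [b])
      else ((pd, b) :: rest, secs)

def pvStepB (st : List (Int × List Int) × List (List Int)) (p : Int × Int) :
    List (Int × List Int) × List (List Int) :=
  let pr := pvPopFlushB p.2 st.1 st.2
  match pr.1 with
  | [] => ([(p.2, [p.1])], pr.2)
  | (pd, b) :: rest =>
      if pd = p.2 then ((pd, b ++ [p.1]) :: rest, pr.2)
      else ((p.2, [p.1]) :: (pd, b) :: rest, pr.2)

-- B's identical idx_to_section fill loop
def pvFillB (n : Nat) (sections : List (List Int)) : List (Option (List Int)) :=
  sections.foldl (fun acc s => s.foldl (fun acc2 i => PySem.List.pySetD acc2 i (some s)) acc)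
    (List.replicate n none)

def make_sections_py_alt (depths : List Int) : List (List Int) × List (List Int) :=
  let st := (PySem.List.enumerate depths 0).foldl pvStepB ([], [])
  -- 'sections.extend(bucket for _, bucket in stack)' walks the Python stack bottom-to-top
  let sections := st.2 ++ (st.1.reverse.map (fun t => t.2))
  (sections, (pvFillB depths.length sections).map (fun o => o.getD []))

-- ===== PRECONDITION & SPEC =====
-- Pre_ restricts to the function's natural domain (tree depths): the list must be nonempty —
-- max([]) raises ValueError — and all depths nonnegative: on a negative depth A's bucket
-- indexing either raises IndexError or wraps around, aliasing depth d with depth max+1+d,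
-- an accident of Python list indexing that no caller would specify.
def Pre_make_sections_py (depths : List Int) : Prop :=
  depths ≠ [] ∧ ∀ d ∈ depths, 0 ≤ d
instance (depths : List Int) : Decidable (Pre_make_sections_py depths) := by
  unfold Pre_make_sections_py; infer_instance

def pvWitness_make_sections_py : List Int := [1, 0, 1]

def Spec_make_sections_py (depths : List Int) (out : List (List Int) × List (List Int)) : Prop :=
  out = make_sections_py_alt depths
instance (depths : List Int) (out : List (List Int) × List (List Int)) :
    Decidable (Spec_make_sections_py depths out) := by unfold Spec_make_sections_py; infer_instance

-- ===== CLAIM (what is proved, stated in full; the proofs are below) =====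
def Claim_equal_make_sections_py : Prop :=
  ∀ (depths : List Int), Dom_make_sections_py depths → Pre_make_sections_py depths →
    Spec_make_sections_py depths (make_sections_py depths)

-- ===== LEMMAS AND PROOFS =====

-- the nonempty buckets of A's array, with their depths, in increasing depth order;
-- B's stack is its reverse
def pvFwd (off : Int) : List (List Int) → List (Int × List Int)
  | [] => []
  | b :: t => (if b = [] then [] else [(off, b)]) ++ pvFwd (off + 1) t

theorem pvFwd_append (off : Int) (xs ys : List (List Int)) :
    pvFwd off (xs ++ ys) = pvFwd off xs ++ pvFwd (off + xs.length) ys := by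
  induction xs generalizing off with
  | nil => simp [pvFwd]
  | cons b t ih =>
      have h : off + ((t.length : Int) + 1) = off + 1 + (t.length : Int) := by ring
      simp only [List.cons_append, pvFwd, ih, List.length_cons, List.append_assoc]
      push_cast
      rw [h]

theorem pvFwd_replicate (off : Int) (k : Nat) :
    pvFwd off (List.replicate k ([] : List Int)) = [] := by
  induction k generalizing off with
  | zero => simp [pvFwd]
  | succ n ih => simp [List.replicate_succ, pvFwd, ih]

theorem pvFwd_mem (off : Int) (xs : List (List Int)) (p : Int × List Int)
    (hp : p ∈ pvFwd off xs) : off ≤ p.1 ∧ p.1 < off + xs.length := by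
  induction xs generalizing off with
  | nil => simp [pvFwd] at hp
  | cons b t ih =>
      simp only [pvFwd, List.mem_append] at hp
      rcases hp with hp | hp
      · rcases (by split at hp <;> simp_all : p = (off, b)) with rfl
        simp only [List.length_cons]
        push_cast
        omega
      · have := ih (off + 1) hp
        simp only [List.length_cons]
        push_cast
        omega

theorem pvFwd_map_snd (off : Int) (xs : List (List Int)) :
    (pvFwd off xs).map (fun t => t.2) = xs.filter (fun b => b ≠ []) := by
  induction xs generalizing off with
  | nil => simp [pvFwd]
  | cons b t ih =>
      simp only [pvFwd, List.map_append, ih, List.filter_cons]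
      split <;> rename_i h <;> simp [h]

theorem pvFlushA_fold (post pre secs : List (List Int)) :
    (PySem.List.pyRange (pre.length : Int) ((pre.length : Int) + (post.length : Int)) 1).foldl
        pvFlushA (pre ++ post, secs)
      = (pre ++ List.replicate post.length [], secs ++ post.filter (fun b => b ≠ [])) := by
  induction post generalizing pre secs with
  | nil =>
      rw [PySem.List.pyRange_one_eq_nil (by simp)]
      simp
  | cons b t ih =>
      have hcons : PySem.List.pyRange (pre.length : Int)
          ((pre.length : Int) + ((b :: t).length : Int)) 1
          = (pre.length : Int) :: PySem.List.pyRange ((pre.length : Int) + 1)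
              ((pre.length : Int) + ((b :: t).length : Int)) 1 := by
        refine PySem.List.pyRange_one_cons ?_
        simp only [List.length_cons]
        push_cast
        omega
      have hget : PySem.List.pyGetD (pre ++ b :: t) ((pre.length : Nat) : Int) ([] : List Int) = b := by
        rw [PySem.List.pyGetD_natCast]
        simp [List.getD_eq_getElem?_getD]
      have hset : PySem.List.pySetD (pre ++ b :: t) ((pre.length : Nat) : Int) ([] : List Int)
          = (pre ++ [[]]) ++ t := by
        rw [PySem.List.pySetD_natCast]
        simp
      have hrange : PySem.List.pyRange ((pre.length : Int) + 1)
            ((pre.length : Int) + ((b :: t).length : Int)) 1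
          = PySem.List.pyRange (((pre ++ [[]]).length : Int))
              (((pre ++ [[]]).length : Int) + (t.length : Int)) 1 := by
        have h1 : (((pre ++ [[]]).length : Nat) : Int) = (pre.length : Int) + 1 := by
          simp only [List.length_append, List.length_cons, List.length_nil]
          push_cast
          ring
        rw [h1]
        congr 1
        push_cast [List.length_cons]
        ring
      rw [hcons]
      simp only [List.foldl_cons]
      by_cases hb : b = ([] : List Int)
      · subst hb
        have hflush : pvFlushA (pre ++ [] :: t, secs) ((pre.length : Nat) : Int)
            = ((pre ++ [[]]) ++ t, secs) := by
          simp [pvFlushA, hget]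
        rw [hflush, hrange, ih]
        simp [List.replicate_succ]
      · have hflush : pvFlushA (pre ++ b :: t, secs) ((pre.length : Nat) : Int)
            = ((pre ++ [[]]) ++ t, secs ++ [b]) := by
          simp only [pvFlushA, hget, hset]
          rw [if_neg (by simpa using hb)]
        rw [hflush, hrange, ih]
        simp [List.replicate_succ, hb]

theorem pvPopFlushB_split (d : Int) (xs ys : List (Int × List Int)) (secs : List (List Int))
    (hx : ∀ p ∈ xs, d < p.1) (hy : ∀ p ∈ ys, p.1 ≤ d) :
    pvPopFlushB d (xs ++ ys) secs = (ys, secs ++ (xs.map (fun t => t.2)).reverse) := by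
  induction xs with
  | nil =>
      simp only [List.nil_append, List.map_nil, List.reverse_nil, List.append_nil]
      cases ys with
      | nil => rfl
      | cons q rest =>
          obtain ⟨qd, qb⟩ := q
          have : ¬ d < qd := not_lt.mpr (hy (qd, qb) (by simp))
          simp [pvPopFlushB, this]
  | cons q t ih =>
      obtain ⟨qd, qb⟩ := q
      have hdq : d < qd := hx (qd, qb) (by simp)
      have ih' := ih (fun p hp => hx p (by simp [hp])) 
      simp only [List.cons_append, pvPopFlushB, if_pos hdq, ih']
      simp

theorem pvGet_mid (xs ys : List (List Int)) (b : List Int) (d : List Int) :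
    PySem.List.pyGetD (xs ++ b :: ys) ((xs.length : Nat) : Int) d = b := by
  rw [PySem.List.pyGetD_natCast]
  simp [List.getD_eq_getElem?_getD]

theorem pvSet_mid (xs ys : List (List Int)) (b v : List Int) :
    PySem.List.pySetD (xs ++ b :: ys) ((xs.length : Nat) : Int) v = xs ++ v :: ys := by
  rw [PySem.List.pySetD_natCast]
  simp

theorem pvStep_sim (M idx d : Int) (r secs : List (List Int))
    (hd0 : 0 ≤ d) (hdM : d ≤ M) (hlen : (r.length : Int) = M + 1) :
    pvStepB ((pvFwd 0 r).reverse, secs) (idx, d)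
        = ((pvFwd 0 (pvStepA M (r, secs) (idx, d)).1).reverse, (pvStepA M (r, secs) (idx, d)).2)
      ∧ (((pvStepA M (r, secs) (idx, d)).1.length : Int) = M + 1) := by
  obtain ⟨n, rfl⟩ : ∃ n : Nat, d = (n : Int) := ⟨d.toNat, (Int.toNat_of_nonneg hd0).symm⟩
  have hnlt : n < r.length := by omega
  have hr : r = r.take n ++ r[n] :: r.drop (n + 1) := by
    rw [← List.drop_eq_getElem_cons hnlt, List.take_append_drop]
  set pre0 := r.take n with hpre0
  set bd := r[n] with hbd
  set post := r.drop (n + 1) with hpost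
  have hl0 : pre0.length = n := by
    rw [hpre0, List.length_take]
    omega
  have hlsum : r.length = n + 1 + post.length := by
    conv_lhs => rw [hr]
    simp [hl0]
    omega
  -- A's flush loop, through pvFlushA_fold
  have hrange : PySem.List.pyRange ((n : Int) + 1) (M + 1) 1
      = PySem.List.pyRange (((pre0 ++ [bd]).length : Nat) : Int)
          ((((pre0 ++ [bd]).length : Nat) : Int) + ((post.length : Nat) : Int)) 1 := by
    have h1 : (((pre0 ++ [bd]).length : Nat) : Int) = (n : Int) + 1 := by
      simp [hl0]
    rw [h1]
    congr 1
    omega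
  have hsplit : r = (pre0 ++ [bd]) ++ post := by
    rw [List.append_assoc]
    simpa using hr
  have hA1 : (PySem.List.pyRange ((n : Int) + 1) (M + 1) 1).foldl pvFlushA (r, secs)
      = ((pre0 ++ [bd]) ++ List.replicate post.length [],
         secs ++ post.filter (fun b => b ≠ [])) := by
    rw [hrange]
    conv_lhs => rw [hsplit]
    exact pvFlushA_fold post (pre0 ++ [bd]) secs
  have hmid : (pre0 ++ [bd]) ++ List.replicate post.length []
      = pre0 ++ bd :: List.replicate post.length [] := by simp
  have hA : pvStepA M (r, secs) (idx, (n : Int))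
      = (pre0 ++ (bd ++ [idx]) :: List.replicate post.length [],
         secs ++ post.filter (fun b => b ≠ [])) := by
    show ((PySem.List.pyRange ((n:Int)+1) (M+1) 1).foldl pvFlushA (r, secs) |> fun st1 =>
      (PySem.List.pySetD st1.1 (n:Int) (PySem.List.pyGetD st1.1 (n:Int) [] ++ [idx]), st1.2))
      = _
    rw [hA1]
    simp only [hmid]
    rw [show ((n : Int)) = ((pre0.length : Nat) : Int) by rw [hl0]]
    rw [pvGet_mid, pvSet_mid]
  -- B's state is A's stack of nonempty buckets
  have hfwd : pvFwd 0 r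
      = (pvFwd 0 pre0 ++ (if bd = [] then [] else [((n : Int), bd)]))
        ++ pvFwd ((n : Int) + 1) post := by
    conv_lhs => rw [hsplit]
    rw [pvFwd_append, pvFwd_append]
    have h0 : (0 : Int) + ((pre0 ++ [bd]).length : Nat) = (n : Int) + 1 := by simp [hl0]
    have h1 : (0 : Int) + ((pre0.length : Nat) : Int) = (n : Int) := by simp [hl0]
    rw [h0, h1]
    simp [pvFwd]
  have hpop : pvPopFlushB (n : Int) ((pvFwd 0 r).reverse) secs
      = ((pvFwd 0 pre0 ++ (if bd = [] then [] else [((n : Int), bd)])).reverse,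
         secs ++ post.filter (fun b => b ≠ [])) := by
    rw [hfwd, List.reverse_append]
    rw [pvPopFlushB_split]
    · congr 1
      rw [List.map_reverse, List.reverse_reverse, pvFwd_map_snd]
    · intro p hp
      have := pvFwd_mem ((n : Int) + 1) post p (List.mem_reverse.mp hp)
      omega
    · intro p hp
      have hmem := List.mem_reverse.mp hp
      rcases List.mem_append.mp hmem with h | h
      · have := pvFwd_mem 0 pre0 p h
        simp [hl0] at this
        omega
      · split at h
        · simp at h
        · simp only [List.mem_singleton] at h
          subst h
          simp
  -- the target stack
  have htgt : pvFwd 0 (pre0 ++ (bd ++ [idx]) :: List.replicate post.length [])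
      = pvFwd 0 pre0 ++ [((n : Int), bd ++ [idx])] := by
    rw [pvFwd_append]
    have h1 : (0 : Int) + ((pre0.length : Nat) : Int) = (n : Int) := by simp [hl0]
    rw [h1]
    simp [pvFwd, pvFwd_replicate]
  refine ⟨?_, ?_⟩
  · show pvStepB ((pvFwd 0 r).reverse, secs) (idx, (n : Int)) = _
    rw [hA]
    simp only [pvStepB, hpop]
    by_cases hbdnil : bd = []
    · rw [if_pos hbdnil]
      simp only [List.append_nil]
      cases hc : (pvFwd 0 pre0).reverse with
      | nil =>
          simp only [htgt, List.reverse_append, hc]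
          simp [hbdnil]
      | cons q rest =>
          have hq : q ∈ pvFwd 0 pre0 := by
            rw [← List.mem_reverse, hc]
            exact List.mem_cons_self
          have hqlt : q.1 < (n : Int) := by
            have := pvFwd_mem 0 pre0 q hq
            simp [hl0] at this
            omega
          obtain ⟨qd, qb⟩ := q
          have : ¬ (qd = (n : Int)) := by
            simp only at hqlt
            omega
          simp only [htgt, List.reverse_append, hc, List.reverse_cons, List.reverse_nil,
            List.nil_append, List.singleton_append]
          simp [this, hbdnil]
    · rw [if_neg hbdnil]
      simp only [htgt, List.reverse_append]
      simp
  · rw [hA]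
    simp only [List.length_cons, List.length_append, List.length_replicate, hl0]
    omega

theorem pvLoop_sim (M : Int) (l : List (Int × Int)) (r secs : List (List Int))
    (hl : ∀ p ∈ l, 0 ≤ p.2 ∧ p.2 ≤ M) (hlen : (r.length : Int) = M + 1) :
    l.foldl pvStepB ((pvFwd 0 r).reverse, secs)
        = ((pvFwd 0 ((l.foldl (pvStepA M) (r, secs)).1)).reverse,
           (l.foldl (pvStepA M) (r, secs)).2)
      ∧ ((l.foldl (pvStepA M) (r, secs)).1.length : Int) = M + 1 := by
  induction l generalizing r secs with
  | nil => exact ⟨rfl, hlen⟩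
  | cons p t ih =>
      obtain ⟨idx, d⟩ := p
      have hd := hl (idx, d) (by simp)
      have hstep := pvStep_sim M idx d r secs hd.1 hd.2 hlen
      simp only [List.foldl_cons]
      rw [hstep.1]
      exact ih _ _ (fun q hq => hl q (by simp [hq])) hstep.2

theorem pvFill_eq : pvFillB = pvFillA := rfl

-- ===== VERDICT (by name: the statement is the Claim_ definition above) =====
theorem make_sections_py_spec : Claim_equal_make_sections_py := by
  intro depths _hdom hpre
  obtain ⟨hne, hnn⟩ := hpre
  unfold Spec_make_sections_py
  obtain ⟨M, hM⟩ : ∃ M, PySem.List.max? depths (fun x => x) = some M := by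
    cases h : PySem.List.max? depths (fun x => x) with
    | none => exact absurd ((PySem.List.max?_eq_none_iff _ _).mp h) hne
    | some M => exact ⟨M, rfl⟩
  have hMmem : M ∈ depths := PySem.List.max?_mem hM
  have hM0 : 0 ≤ M := hnn M hMmem
  have hmax : ∀ y ∈ depths, y ≤ M := PySem.List.max?_isMax hM
  have hlen0 : ((List.replicate (M + 1).toNat ([] : List Int)).length : Int) = M + 1 := by
    simp only [List.length_replicate]
    omega
  have hsim := pvLoop_sim M (PySem.List.enumerate depths 0)
      (List.replicate (M + 1).toNat []) []
      (by intro p hp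
          rcases (PySem.List.mem_enumerate_iff _ _ _).mp hp with ⟨k, hk, rfl⟩
          exact ⟨hnn _ (List.getElem_mem hk), hmax _ (List.getElem_mem hk)⟩)
      hlen0
  have hinit : (pvFwd 0 (List.replicate (M + 1).toNat ([] : List Int))).reverse
      = ([] : List (Int × List Int)) := by
    rw [pvFwd_replicate]
    rfl
  rw [hinit] at hsim
  simp only [make_sections_py, make_sections_py_alt, hM]
  rw [hsim.1]
  have hlenA := hsim.2
  set stA := (PySem.List.enumerate depths 0).foldl (pvStepA M)
      (List.replicate (M + 1).toNat [], ([] : List (List Int))) with hstA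
  have hMlen : M + 1 = ((stA.1.length : Nat) : Int) := hlenA.symm
  rw [hMlen]
  rw [PySem.List.foldl_pyRange_zero_pyGetD' stA.1 ([] : List Int)
        (fun acc b => if 0 < b.length then acc ++ [b] else acc) stA.2]
  rw [PySem.List.foldl_append_ite_eq_filter]
  have hfilter : stA.1.filter (fun x => decide (0 < x.length))
      = stA.1.filter (fun b => b ≠ []) := by
    refine List.filter_congr ?_
    intro x _
    cases x <;> simp
  rw [hfilter]
  have hsecs : stA.2 ++ stA.1.filter (fun b => b ≠ [])
      = stA.2 ++ ((pvFwd 0 stA.1).reverse.reverse.map (fun t => t.2)) := by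
    rw [List.reverse_reverse, pvFwd_map_snd]
  rw [hsecs, pvFill_eq]
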